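-- pv_equiv track=rewrite | github.com/chaitanyakcs/survey-engine | src/services/prompt_builder.py | _generate_default_text_requirements
-- ===== SOURCE A (Python) =====
-- from typing import Dict, List, Any, Optional
--
-- def _generate_default_text_requirements(methodology_tags: List[str]) -> str:
--     """Generate default text requirements based on methodology tags"""
--     # Default text requirements mapping
--     default_requirements = {
--         "van_westendorp": ["Study_Intro", "Product_Usage"],
--         "gabor_granger": ["Study_Intro", "Product_Usage"],
--         "conjoint": ["Study_Intro", "Confidentiality_Agreement"],
--         "concept_test": ["Study_Intro", "Concept_Intro"],
--         "brand_tracker": ["Study_Intro", "Product_Usage"],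
--         "pricing": ["Study_Intro", "Product_Usage"],
--         "survey": ["Study_Intro"]  # Default fallback
--     }
--
--     # Find matching requirements
--     required_texts = set()
--     for tag in methodology_tags:
--         tag_lower = tag.lower()
--         if tag_lower in default_requirements:
--             required_texts.update(default_requirements[tag_lower])
--
--     # Always include Study_Intro and Survey_Closing as mandatory defaults
--     required_texts.add("Study_Intro")
--     required_texts.add("Survey_Closing")
--     if not required_texts:
--         required_texts.add("Study_Intro")
--
--     # Generate text requirements
--     sections = []
--     sections.append("### Study Introduction (REQUIRED at beginning):")
--     sections.append("- Thank participants for participation")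
--     sections.append("- Explain study purpose and estimated completion time")
--     sections.append("- Provide confidentiality assurances")
--     sections.append("- Mention voluntary participation and withdrawal rights")
--     sections.append("")
--
--     if "Product_Usage" in required_texts:
--         sections.append("### Product Usage Introduction (REQUIRED before usage questions):")
--         sections.append("- Introduce product category")
--         sections.append("- Request experience information")
--         sections.append("- Explain qualification purpose")
--         sections.append("")
--
--     if "Concept_Intro" in required_texts:
--         sections.append("### Concept Introduction (REQUIRED before concept evaluation):")
--         sections.append("- Present concept details clearly")
--         sections.append("- Include any stimuli or materials")
--         sections.append("- Instruct participants to review carefully")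
--         sections.append("")
--
--     if "Confidentiality_Agreement" in required_texts:
--         sections.append("### Confidentiality Agreement (REQUIRED):")
--         sections.append("- Assure response confidentiality")
--         sections.append("- Explain research-only usage")
--         sections.append("- Confirm no third-party sharing")
--         sections.append("")
--
--     if "Survey_Closing" in required_texts:
--         sections.append("### Survey Closing (MANDATORY at end):")
--         sections.append("- Thank participants for completion")
--         sections.append("- Acknowledge value of their responses")
--         sections.append("- Provide contact information for questions")
--         sections.append("- Give clear completion instructions")
--         sections.append("")
--
--     sections.append("**IMPORTANT**: These text introductions must appear as standalone content blocks before their related question sections, not as question text.")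
--
--     return "\n".join(sections)
-- ===== SOURCE B (Python) =====
-- def _generate_default_text_requirements(methodology_tags):
--     """Generate default text requirements based on methodology tags"""
--     lowered = [tag.lower() for tag in methodology_tags]
--     usage_tags = ("van_westendorp", "gabor_granger", "brand_tracker", "pricing")
--     blocks = [
--         (True, [
--             "### Study Introduction (REQUIRED at beginning):",
--             "- Thank participants for participation",
--             "- Explain study purpose and estimated completion time",
--             "- Provide confidentiality assurances",
--             "- Mention voluntary participation and withdrawal rights",
--         ]),
--         (any(t in usage_tags for t in lowered), [
--             "### Product Usage Introduction (REQUIRED before usage questions):",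
--             "- Introduce product category",
--             "- Request experience information",
--             "- Explain qualification purpose",
--         ]),
--         ("concept_test" in lowered, [
--             "### Concept Introduction (REQUIRED before concept evaluation):",
--             "- Present concept details clearly",
--             "- Include any stimuli or materials",
--             "- Instruct participants to review carefully",
--         ]),
--         ("conjoint" in lowered, [
--             "### Confidentiality Agreement (REQUIRED):",
--             "- Assure response confidentiality",
--             "- Explain research-only usage",
--             "- Confirm no third-party sharing",
--         ]),
--         (True, [
--             "### Survey Closing (MANDATORY at end):",
--             "- Thank participants for completion",
--             "- Acknowledge value of their responses",
--             "- Provide contact information for questions",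
--             "- Give clear completion instructions",
--         ]),
--     ]
--     lines = [line for wanted, block in blocks if wanted for line in block + [""]]
--     lines.append("**IMPORTANT**: These text introductions must appear as standalone content blocks before their related question sections, not as question text.")
--     return "\n".join(lines)
-- ===== Notes on version B (the rewrite author's own statement) =====
-- stated objective: simpler
-- what changed: Replaces the requirements dict, the accumulated required_texts set and the five separate conditional append-groups by an ordered table of (wanted, block-lines) pairs, computing each block's condition directly from the lowered tags and flattening the wanted blocks in one pass.
import Mathlib
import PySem

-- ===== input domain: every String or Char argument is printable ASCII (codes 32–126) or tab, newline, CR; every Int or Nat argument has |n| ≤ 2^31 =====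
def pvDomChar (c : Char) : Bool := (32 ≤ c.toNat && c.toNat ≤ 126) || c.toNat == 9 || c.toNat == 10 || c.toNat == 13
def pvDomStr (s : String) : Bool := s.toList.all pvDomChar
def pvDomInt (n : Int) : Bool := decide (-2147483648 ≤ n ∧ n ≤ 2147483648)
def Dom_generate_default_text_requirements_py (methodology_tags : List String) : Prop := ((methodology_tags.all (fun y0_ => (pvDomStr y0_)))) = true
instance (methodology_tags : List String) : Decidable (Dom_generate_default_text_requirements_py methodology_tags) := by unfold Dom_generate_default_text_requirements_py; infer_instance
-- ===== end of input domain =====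

-- B replaces A's requirements dict + accumulated set + five separate append-groups by an
-- ordered table of (wanted, block-lines) pairs flattened in one pass (objective: simpler).

-- ===== PORT A =====
def pvReqDict : PySem.Dict String (List String) :=
  PySem.Dict.ofList [
    ("van_westendorp", ["Study_Intro", "Product_Usage"]),
    ("gabor_granger", ["Study_Intro", "Product_Usage"]),
    ("conjoint", ["Study_Intro", "Confidentiality_Agreement"]),
    ("concept_test", ["Study_Intro", "Concept_Intro"]),
    ("brand_tracker", ["Study_Intro", "Product_Usage"]),
    ("pricing", ["Study_Intro", "Product_Usage"]),
    ("survey", ["Study_Intro"])]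

-- the 'required_texts' value of A (loop, the two mandatory adds, the vacuous emptiness fallback)
def pvRequiredTexts (methodology_tags : List String) : PySem.Set String :=
  let required_texts : PySem.Set String :=
    methodology_tags.foldl (fun s tag =>
      let tag_lower := PySem.Str.lower tag
      if pvReqDict.contains tag_lower then
        PySem.Set.update s (pvReqDict.getD tag_lower [])
      else s) PySem.Set.empty
  let required_texts := PySem.Set.add required_texts "Study_Intro"
  let required_texts := PySem.Set.add required_texts "Survey_Closing"
  if required_texts.isEmpty then PySem.Set.add required_texts "Study_Intro" else required_texts

def generate_default_text_requirements_py (methodology_tags : List String) : String :=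
  let required_texts := pvRequiredTexts methodology_tags
  let sections : List String :=
    ["### Study Introduction (REQUIRED at beginning):",
     "- Thank participants for participation",
     "- Explain study purpose and estimated completion time",
     "- Provide confidentiality assurances",
     "- Mention voluntary participation and withdrawal rights",
     ""]
  let sections := if PySem.Set.contains required_texts "Product_Usage" then
      sections ++
        ["### Product Usage Introduction (REQUIRED before usage questions):",
         "- Introduce product category",
         "- Request experience information",
         "- Explain qualification purpose",
         ""]
    else sections
  let sections := if PySem.Set.contains required_texts "Concept_Intro" then
      sections ++
        ["### Concept Introduction (REQUIRED before concept evaluation):",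
         "- Present concept details clearly",
         "- Include any stimuli or materials",
         "- Instruct participants to review carefully",
         ""]
    else sections
  let sections := if PySem.Set.contains required_texts "Confidentiality_Agreement" then
      sections ++
        ["### Confidentiality Agreement (REQUIRED):",
         "- Assure response confidentiality",
         "- Explain research-only usage",
         "- Confirm no third-party sharing",
         ""]
    else sections
  let sections := if PySem.Set.contains required_texts "Survey_Closing" then
      sections ++
        ["### Survey Closing (MANDATORY at end):",
         "- Thank participants for completion",
         "- Acknowledge value of their responses",
         "- Provide contact information for questions",
         "- Give clear completion instructions",
         ""]
    else sections
  let sections := sections ++ ["**IMPORTANT**: These text introductions must appear as standalone content blocks before their related question sections, not as question text."]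
  PySem.Str.join "\n" sections

-- ===== PORT B =====
def pvUsageTags : List String := ["van_westendorp", "gabor_granger", "brand_tracker", "pricing"]

def generate_default_text_requirements_py_alt (methodology_tags : List String) : String :=
  let lowered := methodology_tags.map PySem.Str.lower
  let blocks : List (Bool × List String) :=
    [(true,
      ["### Study Introduction (REQUIRED at beginning):",
       "- Thank participants for participation",
       "- Explain study purpose and estimated completion time",
       "- Provide confidentiality assurances",
       "- Mention voluntary participation and withdrawal rights"]),
     (lowered.any (fun t => pvUsageTags.contains t),
      ["### Product Usage Introduction (REQUIRED before usage questions):",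
       "- Introduce product category",
       "- Request experience information",
       "- Explain qualification purpose"]),
     (lowered.contains "concept_test",
      ["### Concept Introduction (REQUIRED before concept evaluation):",
       "- Present concept details clearly",
       "- Include any stimuli or materials",
       "- Instruct participants to review carefully"]),
     (lowered.contains "conjoint",
      ["### Confidentiality Agreement (REQUIRED):",
       "- Assure response confidentiality",
       "- Explain research-only usage",
       "- Confirm no third-party sharing"]),
     (true,
      ["### Survey Closing (MANDATORY at end):",
       "- Thank participants for completion",
       "- Acknowledge value of their responses",
       "- Provide contact information for questions",
       "- Give clear completion instructions"])]
  let lines := blocks.flatMap (fun b => if b.1 then b.2 ++ [""] else [])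
  PySem.Str.join "\n" (lines ++ ["**IMPORTANT**: These text introductions must appear as standalone content blocks before their related question sections, not as question text."])

-- ===== PRECONDITION & SPEC =====
def Spec_generate_default_text_requirements_py (methodology_tags : List String) (out : String) : Prop := out = generate_default_text_requirements_py_alt methodology_tags
instance (methodology_tags : List String) (out : String) : Decidable (Spec_generate_default_text_requirements_py methodology_tags out) := by unfold Spec_generate_default_text_requirements_py; infer_instance

-- ===== CLAIM (what is proved, stated in full; the proofs are below) =====
def Claim_equal_generate_default_text_requirements_py : Prop := ∀ (methodology_tags : List String), Dom_generate_default_text_requirements_py methodology_tags → Spec_generate_default_text_requirements_py methodology_tags (generate_default_text_requirements_py methodology_tags)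

-- ===== LEMMAS AND PROOFS =====

-- pvReqDict as a literal item list
theorem pvReqDict_eq_mk : pvReqDict = PySem.Dict.mk [
    ("van_westendorp", ["Study_Intro", "Product_Usage"]),
    ("gabor_granger", ["Study_Intro", "Product_Usage"]),
    ("conjoint", ["Study_Intro", "Confidentiality_Agreement"]),
    ("concept_test", ["Study_Intro", "Concept_Intro"]),
    ("brand_tracker", ["Study_Intro", "Product_Usage"]),
    ("pricing", ["Study_Intro", "Product_Usage"]),
    ("survey", ["Study_Intro"])] := by decide

-- which lowered tags contribute "Product_Usage"
theorem pv_getD_PU (t : String) :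
    "Product_Usage" ∈ pvReqDict.getD t [] ↔ t ∈ pvUsageTags := by
  rw [pvReqDict_eq_mk, PySem.Dict.getD_eq_get?_getD]
  simp only [PySem.Dict.get?_mk_cons, pvUsageTags, List.mem_cons]
  split_ifs <;> simp_all [PySem.Dict.get?] <;>
    refine ⟨?_, ?_, ?_, ?_⟩ <;> rintro rfl <;> simp_all

-- which lowered tags contribute "Concept_Intro"
theorem pv_getD_CI (t : String) :
    "Concept_Intro" ∈ pvReqDict.getD t [] ↔ t = "concept_test" := by
  rw [pvReqDict_eq_mk, PySem.Dict.getD_eq_get?_getD]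
  simp only [PySem.Dict.get?_mk_cons]
  split_ifs <;> simp_all [PySem.Dict.get?] <;>
    rintro rfl <;> simp_all

-- which lowered tags contribute "Confidentiality_Agreement"
theorem pv_getD_CA (t : String) :
    "Confidentiality_Agreement" ∈ pvReqDict.getD t [] ↔ t = "conjoint" := by
  rw [pvReqDict_eq_mk, PySem.Dict.getD_eq_get?_getD]
  simp only [PySem.Dict.get?_mk_cons]
  split_ifs <;> simp_all [PySem.Dict.get?] <;>
    rintro rfl <;> simp_all

-- membership in A's accumulated loop set
theorem pv_mem_loop (k : String) (tags : List String) (s : PySem.Set String) :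
    k ∈ tags.foldl (fun s tag =>
      let tag_lower := PySem.Str.lower tag
      if pvReqDict.contains tag_lower then
        PySem.Set.update s (pvReqDict.getD tag_lower [])
      else s) s ↔
    k ∈ s ∨ ∃ t ∈ tags, k ∈ pvReqDict.getD (PySem.Str.lower t) [] := by
  induction tags generalizing s with
  | nil => simp
  | cons t ts ih =>
    simp only [List.foldl_cons, ih, List.mem_cons]
    by_cases h : pvReqDict.contains (PySem.Str.lower t) = true
    · simp only [h, if_true, PySem.Set.mem_update]
      aesop
    · simp only [Bool.not_eq_true] at h
      simp only [h, Bool.false_eq_true, if_false]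
      have hget : pvReqDict.getD (PySem.Str.lower t) ([] : List String) = [] := by
        simp [PySem.Dict.getD_of_not_contains, h]
      aesop

-- membership in A's final required_texts set
theorem pv_mem_required (tags : List String) (k : String) :
    k ∈ pvRequiredTexts tags ↔
      k = "Study_Intro" ∨ k = "Survey_Closing" ∨
      ∃ t ∈ tags, k ∈ pvReqDict.getD (PySem.Str.lower t) [] := by
  unfold pvRequiredTexts
  have hne : ("Survey_Closing" : String) ∈
      PySem.Set.add (PySem.Set.add (tags.foldl (fun s tag =>
        let tag_lower := PySem.Str.lower tag
        if pvReqDict.contains tag_lower then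
          PySem.Set.update s (pvReqDict.getD tag_lower [])
        else s) PySem.Set.empty) "Study_Intro") "Survey_Closing" := by
    rw [PySem.Set.mem_add]; right; rfl
  rw [if_neg (by simp [List.isEmpty_iff]; exact List.ne_nil_of_mem hne)]
  simp only [PySem.Set.mem_add, pv_mem_loop]
  simp [PySem.Set.empty]
  aesop

-- the three data-dependent conditions of A equal B's table conditions, and Survey_Closing is always present
theorem pv_contains_PU (tags : List String) :
    PySem.Set.contains (pvRequiredTexts tags) "Product_Usage" =
      (tags.map PySem.Str.lower).any (fun t => pvUsageTags.contains t) := by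
  rw [Bool.eq_iff_iff, PySem.Set.contains_iff, pv_mem_required]
  simp [pv_getD_PU]

theorem pv_contains_CI (tags : List String) :
    PySem.Set.contains (pvRequiredTexts tags) "Concept_Intro" =
      (tags.map PySem.Str.lower).contains "concept_test" := by
  rw [Bool.eq_iff_iff, PySem.Set.contains_iff, pv_mem_required]
  simp [pv_getD_CI, eq_comm]

theorem pv_contains_CA (tags : List String) :
    PySem.Set.contains (pvRequiredTexts tags) "Confidentiality_Agreement" =
      (tags.map PySem.Str.lower).contains "conjoint" := by
  rw [Bool.eq_iff_iff, PySem.Set.contains_iff, pv_mem_required]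
  simp [pv_getD_CA, eq_comm]

theorem pv_contains_SC (tags : List String) :
    PySem.Set.contains (pvRequiredTexts tags) "Survey_Closing" = true := by
  rw [PySem.Set.contains_iff, pv_mem_required]; tauto

-- ===== VERDICT (by name: the statement is the Claim_ definition above) =====
theorem generate_default_text_requirements_py_spec : Claim_equal_generate_default_text_requirements_py := by
  intro tags _
  unfold Spec_generate_default_text_requirements_py
  unfold generate_default_text_requirements_py generate_default_text_requirements_py_alt
  simp only [pv_contains_PU, pv_contains_CI, pv_contains_CA, pv_contains_SC, if_true]
  cases h1 : (tags.map PySem.Str.lower).any (fun t => pvUsageTags.contains t) <;>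
  cases h2 : (tags.map PySem.Str.lower).contains "concept_test" <;>
  cases h3 : (tags.map PySem.Str.lower).contains "conjoint" <;>
    simp [List.flatMap]
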